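-- pv_equiv track=rewrite | github.com/seprogramd14/baekjoon | 프로그래머스/unrated/135808. 과일 장수/과일 장수.py | solution
-- ===== SOURCE A (Python) =====
-- def solution(k, m, score):
--     answer = 0
--     score.sort()
--     while True:
--         fruit_box = []
--         if len(score) < m: break
--         for _ in range(m):
--             fruit_box.append(score.pop())
--         answer += min(fruit_box) * m
--     return answer
-- ===== SOURCE B (Python) =====
-- def solution(k, m, score):
--     # Closed-form: after sorting, the minimum of the i-th top group sits at a
--     # fixed offset n - i*m, so sum those directly instead of popping boxes.
--     # (Return-value equivalence only: A sorts/pops `score` in place, B does not mutate it.)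
--     s = sorted(score)
--     n = len(s)
--     g = n // m
--     return m * sum(s[n - i * m] for i in range(1, g + 1))
-- ===== Notes on version B (the rewrite author's own statement) =====
-- stated objective: simpler
-- what changed: Replaces the pop-m-elements-per-box while-loop with its per-box min() by one sort plus a direct sum of the group minima, which sit at fixed offsets n - i*m in the sorted list.
import Mathlib
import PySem

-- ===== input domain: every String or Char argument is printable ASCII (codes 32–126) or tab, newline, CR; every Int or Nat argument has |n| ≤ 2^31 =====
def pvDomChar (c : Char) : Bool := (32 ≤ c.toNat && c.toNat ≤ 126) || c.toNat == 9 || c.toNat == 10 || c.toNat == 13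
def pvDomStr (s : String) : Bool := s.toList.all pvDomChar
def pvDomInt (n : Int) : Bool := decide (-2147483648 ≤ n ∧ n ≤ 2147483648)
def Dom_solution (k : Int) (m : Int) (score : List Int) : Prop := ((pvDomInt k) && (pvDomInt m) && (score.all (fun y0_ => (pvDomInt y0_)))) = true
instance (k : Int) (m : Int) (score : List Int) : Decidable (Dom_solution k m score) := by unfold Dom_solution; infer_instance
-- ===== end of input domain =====

-- B replaces A's pop-m-per-box while-loop (with per-box min()) by one sort plus a direct
-- sum of the group minima at fixed offsets; return-value equivalence only — A sorts and
-- pops `score` in place, B does not mutate its argument.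

-- ===== PORT A =====
-- the inner 'for _ in range(m): fruit_box.append(score.pop())' loop
def popA : Nat → List Int → List Int → List Int × List Int
  | 0, fb, s => (fb, s)
  | j+1, fb, s =>
    match s.getLast? with
    | none => (fb, s)        -- Python raises IndexError on pop from empty; unreachable when m ≤ len(score)
    | some v => popA j (fb ++ [v]) s.dropLast

-- the 'while True' loop over state (score, answer); fuel bounds the iteration count
-- (each iteration removes m ≥ 1 elements under Pre_), it never changes a produced value
def loopA : Nat → Int → List Int → Int → Int
  | 0, _, _, answer => answer
  | fuel+1, m, s, answer =>
    if (s.length : Int) < m then answer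
    else
      let p := popA m.toNat [] s
      match PySem.List.min? p.1 (fun x => x) with
      | none => answer       -- Python's min([]) raises ValueError; unreachable when 1 ≤ m
      | some mn => loopA fuel m p.2 (answer + mn * m)

def solution (k : Int) (m : Int) (score : List Int) : Int :=
  loopA (score.length + 1) m (PySem.List.sorted score (fun x => x) false) 0

-- ===== PORT B =====
def solution_alt (k : Int) (m : Int) (score : List Int) : Int :=
  let s := PySem.List.sorted score (fun x => x) false
  let n : Int := s.length
  let g := PySem.Int.floordiv n m
  m * ((PySem.List.pyRange 1 (g+1) 1).foldl
        (fun acc i => acc + PySem.List.pyGetD s (n - i*m) 0) 0)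

-- ===== PRECONDITION & SPEC =====
-- Pre_ excludes m ≤ 0, on which Python A raises ValueError (min of the empty fruit_box)
def Pre_solution (k : Int) (m : Int) (score : List Int) : Prop := 1 ≤ m
instance (k : Int) (m : Int) (score : List Int) : Decidable (Pre_solution k m score) := by unfold Pre_solution; infer_instance
def pvWitness_solution : Int × Int × List Int := (4, 2, [4, 1, 2, 3, 2])
def Spec_solution (k : Int) (m : Int) (score : List Int) (out : Int) : Prop := out = solution_alt k m score
instance (k : Int) (m : Int) (score : List Int) (out : Int) : Decidable (Spec_solution k m score out) := by unfold Spec_solution; infer_instance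

-- ===== CLAIM (what is proved, stated in full; the proofs are below) =====
def Claim_equal_solution : Prop := ∀ (k : Int) (m : Int) (score : List Int), Dom_solution k m score → Pre_solution k m score → Spec_solution k m score (solution k m score)

-- ===== LEMMAS AND PROOFS =====

-- B's summation, as a function of the (already sorted) list
def sumB (m : Int) (s : List Int) : Int :=
  (PySem.List.pyRange 1 (PySem.Int.floordiv (s.length : Int) m + 1) 1).foldl
    (fun acc i => acc + PySem.List.pyGetD s ((s.length : Int) - i*m) 0) 0

theorem sumB_def (m : Int) (s : List Int) :
    sumB m s = ((PySem.List.pyRange 1 (PySem.Int.floordiv (s.length : Int) m + 1) 1).map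
      (fun i => PySem.List.pyGetD s ((s.length : Int) - i*m) 0)).sum := by
  simp [sumB, PySem.List.foldl_add]

theorem popA_eq (j : Nat) : ∀ (s : List Int) (fb : List Int), j ≤ s.length →
    popA j fb s = (fb ++ (s.drop (s.length - j)).reverse, s.take (s.length - j)) := by
  induction j with
  | zero => intro s fb _; simp [popA]
  | succ j ih =>
    intro s fb hj
    have hne : s ≠ [] := by rintro rfl; simp at hj
    have hlast : s.getLast? = some (s.getLast hne) := List.getLast?_eq_some_getLast hne
    have hdl : s.dropLast.length = s.length - 1 := by simp
    have hdec : s = s.dropLast ++ [s.getLast hne] := (List.dropLast_append_getLast hne).symm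
    rw [popA, hlast]
    simp only []
    rw [ih s.dropLast (fb ++ [s.getLast hne]) (by omega)]
    have hk : s.dropLast.length - j = s.length - (j + 1) := by omega
    have hkle : s.length - (j + 1) ≤ s.dropLast.length := by omega
    refine Prod.ext ?_ ?_
    · -- fruit_box component
      rw [hk]
      have hdrop := List.drop_append_of_le_length hkle (l₂ := [s.getLast hne])
      rw [← hdec] at hdrop
      simp only [hdrop, List.reverse_append]
      simp
    · -- remaining score component
      rw [hk]
      have htake := List.take_append_of_le_length hkle (l₂ := [s.getLast hne])
      rw [← hdec] at htake
      simp [htake]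

theorem min_rev_sorted (t : List Int) (ht : t ≠ []) (hp : t.Pairwise (· ≤ ·)) :
    PySem.List.min? t.reverse (fun x => x) = some (t.head ht) := by
  obtain ⟨v, hv⟩ : ∃ v, PySem.List.min? t.reverse (fun x => x) = some v := by
    rcases h : PySem.List.min? t.reverse (fun x => x) with _ | v
    · exact absurd ((PySem.List.min?_eq_none_iff t.reverse (fun x => x)).mp h) (by simpa using ht)
    · exact ⟨v, rfl⟩
  have hmem : v ∈ t := by simpa using PySem.List.min?_mem hv
  have hmin : ∀ y ∈ t, v ≤ y := by
    intro y hy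
    simpa using PySem.List.min?_isMin hv y (by simpa using hy)
  have hhead : t.head ht ≤ v := by
    rcases List.exists_cons_of_ne_nil ht with ⟨x, xs, rfl⟩
    rcases List.mem_cons.mp hmem with rfl | hvm
    · simp
    · simpa using (List.pairwise_cons.mp hp).1 v hvm
  have : v = t.head ht := le_antisymm (hmin _ (List.head_mem ht)) hhead
  rw [hv, this]

theorem pyGetD_take_eq (s : List Int) (d : Nat) (i : Int) (h0 : 0 ≤ i) (h1 : i < (d : Int))
    (hd : d ≤ s.length) : PySem.List.pyGetD (s.take d) i 0 = PySem.List.pyGetD s i 0 := by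
  rw [PySem.List.pyGetD_eq_getElem (s.take d) 0 h0 (by simp; omega),
      PySem.List.pyGetD_eq_getElem s 0 h0 (by omega)]
  simp [List.getElem_take]

theorem sumB_small (m : Int) (s : List Int) (hm : 1 ≤ m) (h : (s.length : Int) < m) :
    sumB m s = 0 := by
  have hg : PySem.Int.floordiv (s.length : Int) m = 0 := by
    rw [PySem.Int.floordiv_eq_iff_of_pos (by omega)]
    constructor <;> [simp; simpa using h]
  rw [sumB, hg]
  rw [PySem.List.pyRange_one_eq_nil (by omega)]
  rfl

theorem sumB_step (m : Int) (s : List Int) (hm : 1 ≤ m) (h : m ≤ (s.length : Int)) :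
    sumB m s = PySem.List.pyGetD s ((s.length : Int) - m) 0 + sumB m (s.take (s.length - m.toNat)) := by
  have hm0 : (0:Int) < m := by omega
  have hmn : m.toNat ≤ s.length := by omega
  set n : Int := (s.length : Int) with hn
  set g : Int := PySem.Int.floordiv n m with hg
  have hgb : g * m ≤ n ∧ n < (g + 1) * m :=
    (PySem.Int.floordiv_eq_iff_of_pos hm0).mp hg.symm
  have hg1 : 1 ≤ g := by nlinarith [hgb.1, hgb.2]
  have hlen' : ((s.take (s.length - m.toNat)).length : Int) = n - m := by
    simp [hn]; omega
  have hg' : PySem.Int.floordiv ((s.take (s.length - m.toNat)).length : Int) m = g - 1 := by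
    rw [hlen', PySem.Int.floordiv_eq_iff_of_pos hm0]
    constructor <;> nlinarith [hgb.1, hgb.2]
  rw [sumB_def, sumB_def, hg', ← hn, ← hg]
  rw [PySem.List.pyRange_one_cons (by omega), List.map_cons, List.sum_cons, one_mul]
  congr 1
  have hsub : g - 1 + 1 = g := by ring
  rw [hsub, PySem.List.pyRange_one, PySem.List.pyRange_one]
  have hN : (g + 1 - (1 + 1)).toNat = (g - 1).toNat := by omega
  rw [hN, List.map_map, List.map_map]
  apply congrArg
  apply List.map_congr_left
  intro x hx
  have hxN : (x : Int) < g - 1 := by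
    have := List.mem_range.mp hx
    omega
  simp only [Function.comp]
  have hidx : n - (1 + 1 + (x:Int)) * m = n - m - (1 + (x:Int)) * m := by ring
  rw [hidx]
  rw [hlen']
  have h0 : (0:Int) ≤ n - m - (1 + (x:Int)) * m := by nlinarith [hgb.1]
  have h1 : n - m - (1 + (x:Int)) * m < ((s.length - m.toNat : Nat) : Int) := by
    have hmt : ((m.toNat : Int)) = m := by omega
    have hpos : (0:Int) < (1 + (x:Int)) * m := mul_pos (by positivity) hm0
    push_cast [hmn]
    linarith [hpos, hmt, hn]
  rw [pyGetD_take_eq s (s.length - m.toNat) _ h0 h1 (by omega)]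

theorem loop_eq (m : Int) (hm : 1 ≤ m) : ∀ (fuel : Nat) (s : List Int), s.length < fuel →
    s.Pairwise (· ≤ ·) → ∀ a, loopA fuel m s a = a + m * sumB m s := by
  intro fuel
  induction fuel with
  | zero => intro s h; omega
  | succ fuel ih =>
    intro s hlen hp a
    rw [loopA]
    by_cases hsm : (s.length : Int) < m
    · rw [if_pos hsm, sumB_small m s hm hsm]; ring
    · rw [if_neg hsm]
      have hml : m.toNat ≤ s.length := by omega
      set d : Nat := s.length - m.toNat with hd
      have hpop := popA_eq m.toNat s [] hml
      have hdne : s.drop d ≠ [] := by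
        intro hnil
        have := congrArg List.length hnil
        simp [hd] at this
        omega
      have hps : (s.drop d).Pairwise (· ≤ ·) := hp.sublist (List.drop_sublist ..)
      have hmin := min_rev_sorted (s.drop d) hdne hps
      have hdlt : d < s.length := by omega
      have hhead : (s.drop d).head hdne = s[d]'hdlt := List.head_drop hdne
      simp only [hpop, List.nil_append]
      rw [hmin, hhead]
      show loopA fuel m (s.take d) (a + s[d]'hdlt * m) = a + m * sumB m s
      have hlt : (s.take d).length < fuel := by simp [hd]; omega
      have hpt : (s.take d).Pairwise (· ≤ ·) := hp.sublist (List.take_sublist ..)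
      rw [ih (s.take d) hlt hpt]
      have hgd : PySem.List.pyGetD s ((s.length : Int) - m) 0 = s[d]'hdlt := by
        rw [PySem.List.pyGetD_eq_getElem s 0 (by omega) (by omega)]
        congr 1
        omega
      have hstep := sumB_step m s hm (by omega)
      have heq : s.take (s.length - m.toNat) = s.take d := rfl
      rw [hgd, heq] at hstep
      rw [hstep]
      ring

-- ===== VERDICT (by name: the statement is the Claim_ definition above) =====
theorem solution_spec : Claim_equal_solution := by
  intro k m score _ hm
  unfold Spec_solution solution solution_alt
  have hlen : (PySem.List.sorted score (fun x => x) false).length = score.length :=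
    PySem.List.length_sorted ..
  have := loop_eq m hm (score.length + 1) (PySem.List.sorted score (fun x => x) false)
    (by omega) (by simpa using PySem.List.sorted_pairwise score (fun x => x)) 0
  rw [this]
  simp [sumB]
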